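-- pv_equiv track=rewrite | github.com/scottpeterman/parsing_fire | tfsm2ttp/multisection.py | parse_textfsm_filldown_values
-- ===== SOURCE A (Python) =====
-- from typing import List, Dict, Tuple
--
-- def parse_textfsm_filldown_values(textfsm_template: str) -> Tuple[List[str], List[str]]:
--     """
--     Parse TextFSM template to identify Filldown vs regular values.
--     Returns (filldown_vars, regular_vars)
--     """
--     filldown_vars = []
--     regular_vars = []
--
--     for line in textfsm_template.splitlines():
--         line = line.strip()
--         if line.startswith('Value'):
--             # Parse: Value [Filldown] [Required] NAME (regex)
--             parts = line.split()
--             if len(parts) >= 3: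
--                 # Find the variable name (first part that starts with uppercase after Value)
--                 is_filldown = 'Filldown' in parts
--
--                 # Variable name is typically after Value/Filldown/Required keywords
--                 for i, part in enumerate(parts[1:], 1):
--                     if part not in ('Filldown', 'Required', 'List', 'Fillup') and not part.startswith('('):
--                         var_name = part
--                         if is_filldown:
--                             filldown_vars.append(var_name)
--                         else:
--                             regular_vars.append(var_name)
--                         break
--
--     return filldown_vars, regular_vars
-- ===== SOURCE B (Python) =====
-- def parse_textfsm_filldown_values(textfsm_template):
--     """
--     Parse TextFSM template to identify Filldown vs regular values.
--     Returns (filldown_vars, regular_vars)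
--     """
--     skip = ('Filldown', 'Required', 'List', 'Fillup')
--
--     def go(lines):
--         # recurse on the tail first, then prepend this line's contribution
--         if not lines:
--             return [], []
--         fd, reg = go(lines[1:])
--         parts = lines[0].split()
--         if len(parts) >= 3 and parts[0].startswith('Value'):
--             rest = parts[1:]
--             while rest and (rest[0] in skip or rest[0].startswith('(')):
--                 rest = rest[1:]
--             if rest:
--                 if 'Filldown' in parts:
--                     return [rest[0]] + fd, reg
--                 return fd, [rest[0]] + reg
--         return fd, reg
--
--     return go(textfsm_template.splitlines())
-- ===== Notes on version B (the rewrite author's own statement) =====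
-- stated objective: alternative
-- what changed: B is a recursive function over the line list that builds both result lists back-to-front by prepending (instead of A's iterative loop appending to two accumulators), tests the first token instead of strip+startswith, and picks the variable name by dropping leading skippable tokens with a while loop and taking the head instead of A's enumerate/break scan.
import Mathlib
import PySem

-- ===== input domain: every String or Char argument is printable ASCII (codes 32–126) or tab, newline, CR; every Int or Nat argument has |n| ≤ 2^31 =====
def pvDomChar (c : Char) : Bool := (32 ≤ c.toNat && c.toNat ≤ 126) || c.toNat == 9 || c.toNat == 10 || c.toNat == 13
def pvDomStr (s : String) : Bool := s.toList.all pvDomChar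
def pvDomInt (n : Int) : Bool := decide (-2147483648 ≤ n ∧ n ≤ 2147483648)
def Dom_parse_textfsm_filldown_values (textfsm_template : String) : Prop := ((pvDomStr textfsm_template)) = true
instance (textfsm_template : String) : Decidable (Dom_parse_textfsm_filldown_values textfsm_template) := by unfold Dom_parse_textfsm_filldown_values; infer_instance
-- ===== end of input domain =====

-- B (objective: alternative, same cost): a recursive function over the line list building both result
-- lists back-to-front by prepending, testing the first token instead of strip+startswith, and choosing
-- the name by dropping leading skippable tokens and taking the head instead of an enumerate/break scan.

-- ===== PORT A =====
-- inner 'for i, part in enumerate(parts[1:], 1): … break' loop of A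
def pvAScan (items : List (Int × String)) (is_filldown : Bool)
    (filldown_vars regular_vars : List String) : List String × List String :=
  match items with
  | [] => (filldown_vars, regular_vars)
  | (_, part) :: rest =>
    if part ∉ ["Filldown", "Required", "List", "Fillup"] ∧ ¬ (PySem.Str.startswith part "(" = true) then
      if is_filldown then (filldown_vars ++ [part], regular_vars)
      else (filldown_vars, regular_vars ++ [part])
    else pvAScan rest is_filldown filldown_vars regular_vars

def parse_textfsm_filldown_values (textfsm_template : String) : List String × List String :=
  (PySem.Str.splitlines textfsm_template).foldl
    (fun acc line =>
      let line := PySem.Str.strip line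
      if PySem.Str.startswith line "Value" = true then
        let parts := PySem.Str.split₀ line
        if 3 ≤ parts.length then
          let is_filldown : Bool := parts.contains "Filldown"
          pvAScan (PySem.List.enumerate (PySem.List.slice parts (some 1)) 1) is_filldown acc.1 acc.2
        else acc
      else acc)
    ([], [])

-- ===== PORT B =====
def pvSkipKw : List String := ["Filldown", "Required", "List", "Fillup"]

-- Source B's 'while rest and (rest[0] in skip or rest[0].startswith('(')): rest = rest[1:]'
def pvDropSkip : List String → List String
  | [] => []
  | p :: rest =>
    if pvSkipKw.contains p || PySem.Str.startswith p "(" then pvDropSkip rest else p :: rest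

-- Source B's inner recursive 'go' over the line list
def pvGo : List String → List String × List String
  | [] => ([], [])
  | line :: ls =>
    let fr := pvGo ls
    let parts := PySem.Str.split₀ line
    if 3 ≤ parts.length ∧ PySem.Str.startswith (parts.headD "") "Value" = true then
      match pvDropSkip (PySem.List.slice parts (some 1)) with
      | [] => fr
      | name :: _ =>
        if parts.contains "Filldown" then (name :: fr.1, fr.2) else (fr.1, name :: fr.2)
    else fr

def parse_textfsm_filldown_values_alt (textfsm_template : String) : List String × List String :=
  pvGo (PySem.Str.splitlines textfsm_template)

-- ===== PRECONDITION & SPEC =====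
def Spec_parse_textfsm_filldown_values (textfsm_template : String) (out : List String × List String) : Prop := out = parse_textfsm_filldown_values_alt textfsm_template
instance (textfsm_template : String) (out : List String × List String) : Decidable (Spec_parse_textfsm_filldown_values textfsm_template out) := by unfold Spec_parse_textfsm_filldown_values; infer_instance

-- ===== CLAIM (what is proved, stated in full; the proofs are below) =====
def Claim_equal_parse_textfsm_filldown_values : Prop := ∀ (textfsm_template : String), Dom_parse_textfsm_filldown_values textfsm_template → Spec_parse_textfsm_filldown_values textfsm_template (parse_textfsm_filldown_values textfsm_template)

-- ===== LEMMAS AND PROOFS =====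
theorem pv_go_nil (cur : List Char) (acc : List (List Char)) :
    PySem.Chars.split₀.go [] cur acc = if cur.isEmpty then acc.reverse else (cur.reverse :: acc).reverse := by
  rw [PySem.Chars.split₀.go]
theorem pv_go_space_nil {c : Char} (l : List Char) (acc : List (List Char)) (hs : PySem.Chars.isspace c = true) :
    PySem.Chars.split₀.go (c :: l) [] acc = PySem.Chars.split₀.go l [] acc := by
  rw [PySem.Chars.split₀.go]; simp [hs]
theorem pv_go_space {c : Char} (l cur : List Char) (acc : List (List Char)) (hs : PySem.Chars.isspace c = true) (hc : cur.isEmpty = false) :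
    PySem.Chars.split₀.go (c :: l) cur acc = PySem.Chars.split₀.go l [] (cur.reverse :: acc) := by
  rw [PySem.Chars.split₀.go]; simp [hs, hc]
theorem pv_go_nonspace {c : Char} (l cur : List Char) (acc : List (List Char)) (hs : PySem.Chars.isspace c = false) :
    PySem.Chars.split₀.go (c :: l) cur acc = PySem.Chars.split₀.go l (c :: cur) acc := by
  rw [PySem.Chars.split₀.go]; simp [hs]

theorem pv_go_acc (l : List Char) : ∀ (cur : List Char) (acc : List (List Char)),
    PySem.Chars.split₀.go l cur acc = acc.reverse ++ PySem.Chars.split₀.go l cur [] := by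
  induction l with
  | nil =>
    intro cur acc
    rw [pv_go_nil, pv_go_nil]
    by_cases h : cur.isEmpty <;> simp [h]
  | cons c rest ih =>
    intro cur acc
    by_cases hs : PySem.Chars.isspace c = true
    · rcases hc : cur.isEmpty with _ | _
      · rw [pv_go_space _ _ _ hs hc, pv_go_space _ _ _ hs hc,
          ih [] (cur.reverse :: acc), ih [] [cur.reverse]]
        simp
      · have hc' : cur = [] := by simpa [List.isEmpty_iff] using hc
        subst hc'
        rw [pv_go_space_nil _ _ hs, pv_go_space_nil _ _ hs, ih [] acc]
    · rw [pv_go_nonspace _ _ _ (by simpa using hs), pv_go_nonspace _ _ _ (by simpa using hs)]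
      exact ih _ _

theorem pv_go_spaces_nil (t : List Char) : ∀ (acc : List (List Char)),
    (∀ c ∈ t, PySem.Chars.isspace c = true) →
    PySem.Chars.split₀.go t [] acc = acc.reverse := by
  induction t with
  | nil => intro acc _; rw [pv_go_nil]; simp
  | cons c rest ih =>
    intro acc h
    rw [pv_go_space_nil _ _ (h c (by simp))]
    exact ih acc (fun d hd => h d (by simp [hd]))

theorem pv_go_append_spaces (x : List Char) : ∀ (t cur : List Char) (acc : List (List Char)),
    (∀ c ∈ t, PySem.Chars.isspace c = true) →
    PySem.Chars.split₀.go (x ++ t) cur acc = PySem.Chars.split₀.go x cur acc := by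
  induction x with
  | nil =>
    intro t cur acc ht
    rcases hc : cur.isEmpty with _ | _
    · cases t with
      | nil => simp
      | cons c t' =>
        rw [List.nil_append, pv_go_space _ _ _ (ht c (by simp)) hc,
          pv_go_spaces_nil _ _ (fun d hd => ht d (by simp [hd])), pv_go_nil]
        simp [hc]
    · have hc' : cur = [] := by simpa [List.isEmpty_iff] using hc
      subst hc'
      rw [List.nil_append, pv_go_spaces_nil _ _ ht, pv_go_nil]
      simp
  | cons c x' ih =>
    intro t cur acc ht
    by_cases hs : PySem.Chars.isspace c = true
    · rcases hc : cur.isEmpty with _ | _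
      · rw [List.cons_append, pv_go_space _ _ _ hs hc, pv_go_space _ _ _ hs hc]
        exact ih t _ _ ht
      · have hc' : cur = [] := by simpa [List.isEmpty_iff] using hc
        subst hc'
        rw [List.cons_append, pv_go_space_nil _ _ hs, pv_go_space_nil _ _ hs]
        exact ih t _ _ ht
    · rw [List.cons_append, pv_go_nonspace _ _ _ (by simpa using hs),
        pv_go_nonspace _ _ _ (by simpa using hs)]
      exact ih t _ _ ht

def pvP : Char → Bool := fun c => !PySem.Chars.isspace c

theorem pv_split₀_nil : PySem.Chars.split₀ [] = [] := rfl

theorem pv_split₀_cons_space {c : Char} (l : List Char) (h : PySem.Chars.isspace c = true) :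
    PySem.Chars.split₀ (c :: l) = PySem.Chars.split₀ l := by
  unfold PySem.Chars.split₀
  exact pv_go_space_nil _ _ h

theorem pv_go_first (l : List Char) : ∀ (cur : List Char), cur ≠ [] →
    PySem.Chars.split₀.go l cur [] =
      (cur.reverse ++ l.takeWhile pvP) :: PySem.Chars.split₀ (l.dropWhile pvP) := by
  induction l with
  | nil =>
    intro cur hc
    rw [pv_go_nil]
    simp [List.isEmpty_iff, hc, pv_split₀_nil]
  | cons c rest ih =>
    intro cur hc
    by_cases hs : PySem.Chars.isspace c = true
    · have hcur : cur.isEmpty = false := by simpa [List.isEmpty_iff] using hc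
      have hP : pvP c = false := by simp [pvP, hs]
      rw [pv_go_space _ _ _ hs hcur, pv_go_acc]
      simp only [List.takeWhile_cons, List.dropWhile_cons, hP, Bool.false_eq_true, if_false]
      rw [pv_split₀_cons_space rest hs]
      simp [PySem.Chars.split₀]
    · have hP : pvP c = true := by simp [pvP, hs]
      rw [pv_go_nonspace _ _ _ (by simpa using hs), ih (c :: cur) (by simp)]
      simp [List.takeWhile_cons, List.dropWhile_cons, hP]

theorem pv_split₀_cons_nonspace {c : Char} (l : List Char) (h : PySem.Chars.isspace c = false) :
    PySem.Chars.split₀ (c :: l) =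
      (c :: l.takeWhile pvP) :: PySem.Chars.split₀ (l.dropWhile pvP) := by
  unfold PySem.Chars.split₀
  rw [pv_go_nonspace _ _ _ h, pv_go_first l [c] (by simp)]
  rfl

theorem pv_split₀_lstrip (l : List Char) :
    PySem.Chars.split₀ (PySem.Chars.lstrip l) = PySem.Chars.split₀ l := by
  induction l with
  | nil => rfl
  | cons c rest ih =>
    by_cases hs : PySem.Chars.isspace c = true
    · rw [pv_split₀_cons_space rest hs, ← ih]
      simp [PySem.Chars.lstrip, List.dropWhile_cons, hs]
    · simp [PySem.Chars.lstrip, List.dropWhile_cons, hs]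

theorem pv_split₀_rstrip (l : List Char) :
    PySem.Chars.split₀ (PySem.Chars.rstrip l) = PySem.Chars.split₀ l := by
  have hdecomp : l = PySem.Chars.rstrip l ++ (l.reverse.takeWhile PySem.Chars.isspace).reverse := by
    unfold PySem.Chars.rstrip
    have h := List.takeWhile_append_dropWhile (p := PySem.Chars.isspace) (l := l.reverse)
    calc l = l.reverse.reverse := by rw [List.reverse_reverse]
    _ = (List.takeWhile PySem.Chars.isspace l.reverse ++ List.dropWhile PySem.Chars.isspace l.reverse).reverse := by rw [h]
    _ = (List.dropWhile PySem.Chars.isspace l.reverse).reverse ++ (List.takeWhile PySem.Chars.isspace l.reverse).reverse := by rw [List.reverse_append]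
  conv_rhs => rw [hdecomp]
  unfold PySem.Chars.split₀
  rw [pv_go_append_spaces]
  intro c hc
  exact List.mem_takeWhile_imp (by simpa using hc)

theorem pv_split₀_strip (l : List Char) :
    PySem.Chars.split₀ (PySem.Chars.strip l) = PySem.Chars.split₀ l := by
  unfold PySem.Chars.strip
  rw [pv_split₀_rstrip, pv_split₀_lstrip]

theorem pv_prefix_takeWhile {V l : List Char} (hV : ∀ c ∈ V, pvP c = true) :
    V <+: l.takeWhile pvP ↔ V <+: l := by
  constructor
  · intro h; exact h.trans (List.takeWhile_prefix pvP)
  · rintro ⟨t, rfl⟩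
    rw [List.takeWhile_append]
    have hVt : V.takeWhile pvP = V := List.takeWhile_eq_self_iff.mpr hV
    rw [hVt]
    split_ifs <;> simp

theorem pv_startswith_rstrip {V : List Char} (m : List Char)
    (hV : ∀ c ∈ V, pvP c = true) :
    PySem.Chars.startswith (PySem.Chars.rstrip m) V = PySem.Chars.startswith m V := by
  rcases hb : PySem.Chars.startswith m V with _ | _
  · rcases hr : PySem.Chars.startswith (PySem.Chars.rstrip m) V with _ | _
    · rfl
    · exfalso
      have h1 : V <+: PySem.Chars.rstrip m := (PySem.Chars.startswith_iff _ _).mp hr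
      have h2 : PySem.Chars.rstrip m <+: m := by
        unfold PySem.Chars.rstrip
        have h3 := (List.dropWhile_suffix (l := m.reverse) PySem.Chars.isspace).reverse
        rwa [List.reverse_reverse] at h3
      have h4 := (PySem.Chars.startswith_iff m V).mpr (h1.trans h2)
      rw [hb] at h4; exact Bool.false_ne_true h4
  · rw [(PySem.Chars.startswith_iff _ _).mpr]
    obtain ⟨t, rfl⟩ := (PySem.Chars.startswith_iff m V).mp hb
    unfold PySem.Chars.rstrip
    rw [List.reverse_append, List.dropWhile_append]
    by_cases he : (List.dropWhile PySem.Chars.isspace t.reverse).isEmpty = true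
    · rw [if_pos he]
      have hVr : List.dropWhile PySem.Chars.isspace V.reverse = V.reverse := by
        cases hV' : V.reverse with
        | nil => simp
        | cons a as =>
          have ha : a ∈ V := by
            have : a ∈ V.reverse := by rw [hV']; simp
            simpa using this
          have hna : PySem.Chars.isspace a = false := by
            have := hV a ha; simpa [pvP] using this
          simp [List.dropWhile_cons, hna]
      rw [hVr, List.reverse_reverse]
    · rw [if_neg he]
      rw [List.reverse_append, List.reverse_reverse]
      exact ⟨_, rfl⟩

theorem pv_startswith_strip (l : List Char) {V : List Char} (hne : V ≠ [])
    (hV : ∀ c ∈ V, pvP c = true) :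
    PySem.Chars.startswith (PySem.Chars.strip l) V =
      (match PySem.Chars.split₀ l with
       | [] => false
       | p :: _ => PySem.Chars.startswith p V) := by
  unfold PySem.Chars.strip
  rw [pv_startswith_rstrip _ hV]
  induction l with
  | nil =>
    rw [pv_split₀_nil]
    simp only [PySem.Chars.lstrip, List.dropWhile_nil]
    cases V with
    | nil => exact absurd rfl hne
    | cons a as => simp [PySem.Chars.startswith, List.isPrefixOf]
  | cons c rest ih =>
    by_cases hs : PySem.Chars.isspace c = true
    · rw [pv_split₀_cons_space rest hs, ← ih]
      simp [PySem.Chars.lstrip, List.dropWhile_cons, hs]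
    · rw [pv_split₀_cons_nonspace rest (by simpa using hs)]
      have hl : PySem.Chars.lstrip (c :: rest) = c :: rest := by
        simp [PySem.Chars.lstrip, List.dropWhile_cons, hs]
      rw [hl]
      have h1 : (c :: rest).takeWhile pvP = c :: rest.takeWhile pvP := by
        simp [List.takeWhile_cons, pvP, hs]
      show PySem.Chars.startswith (c :: rest) V = PySem.Chars.startswith (c :: List.takeWhile pvP rest) V
      rcases hb : PySem.Chars.startswith (c :: rest) V with _ | _
      · rcases hb2 : PySem.Chars.startswith (c :: List.takeWhile pvP rest) V with _ | _
        · rfl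
        · exfalso
          have h2 := (PySem.Chars.startswith_iff _ V).mp hb2
          rw [← h1] at h2
          have h3 := (pv_prefix_takeWhile hV).mp h2
          have h4 := (PySem.Chars.startswith_iff _ V).mpr h3
          rw [hb] at h4; exact Bool.false_ne_true h4
      · have h2 := (PySem.Chars.startswith_iff _ V).mp hb
        have h3 := (pv_prefix_takeWhile hV).mpr h2
        rw [h1] at h3
        exact ((PySem.Chars.startswith_iff _ V).mpr h3).symm

-- ---- per-line entry (proof-side description of one line's contribution) ----

def pvEntry (line : String) : Option (Bool × String) :=
  let parts := PySem.Str.split₀ line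
  if 3 ≤ parts.length ∧ PySem.Str.startswith (parts.headD "") "Value" = true then
    ((parts.drop 1).find? (fun p => !pvSkipKw.contains p && !PySem.Str.startswith p "(")).map
      (fun name => (parts.contains "Filldown", name))
  else none

def pvSelF (e : Option (Bool × String)) : List String :=
  match e with
  | some p => if p.1 then [p.2] else []
  | none => []

def pvSelR (e : Option (Bool × String)) : List String :=
  match e with
  | some p => if p.1 then [] else [p.2]
  | none => []

-- ---- A's inner scan = find? ----

theorem pv_pred_eq (q : String) :
    (!pvSkipKw.contains q && !PySem.Str.startswith q "(") =
      decide (q ∉ ["Filldown", "Required", "List", "Fillup"] ∧ ¬ (PySem.Str.startswith q "(" = true)) := by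
  simp [pvSkipKw]

theorem pv_scan_eq_find (ps : List String) : ∀ (s : Int) (isf : Bool) (fd reg : List String),
    pvAScan (PySem.List.enumerate ps s) isf fd reg =
      (match ps.find? (fun p => !pvSkipKw.contains p && !PySem.Str.startswith p "(") with
       | some n => if isf then (fd ++ [n], reg) else (fd, reg ++ [n])
       | none => (fd, reg)) := by
  induction ps with
  | nil => intro s isf fd reg; simp [PySem.List.enumerate, pvAScan]
  | cons p rest ih =>
    intro s isf fd reg
    rw [PySem.List.enumerate_cons]
    show (if p ∉ ["Filldown", "Required", "List", "Fillup"] ∧ ¬ (PySem.Str.startswith p "(" = true)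
      then if isf then (fd ++ [p], reg) else (fd, reg ++ [p])
      else pvAScan (PySem.List.enumerate rest (s+1)) isf fd reg) = _
    rw [List.find?_cons, pv_pred_eq]
    by_cases h : p ∉ ["Filldown", "Required", "List", "Fillup"] ∧ ¬ (PySem.Str.startswith p "(" = true)
    · rw [if_pos h, decide_eq_true h]
    · rw [if_neg h, decide_eq_false h, ih]

-- ---- B's while loop = find? ----

theorem pv_dropskip_eq_find (ps : List String) :
    pvDropSkip ps = ps.dropWhile (fun p => pvSkipKw.contains p || PySem.Str.startswith p "(") := by
  induction ps with
  | nil => rfl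
  | cons p rest ih =>
    unfold pvDropSkip
    rw [List.dropWhile_cons]
    by_cases h : (pvSkipKw.contains p || PySem.Str.startswith p "(") = true
    · rw [if_pos h, if_pos h, ih]
    · rw [if_neg h, if_neg h]

theorem pv_head_dropWhile_eq_find? (ps : List String) :
    (ps.dropWhile (fun p => pvSkipKw.contains p || PySem.Str.startswith p "(")).head? =
      ps.find? (fun p => !pvSkipKw.contains p && !PySem.Str.startswith p "(") := by
  induction ps with
  | nil => rfl
  | cons p rest ih =>
    rw [List.dropWhile_cons, List.find?_cons]
    by_cases h : (pvSkipKw.contains p || PySem.Str.startswith p "(") = true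
    · have h2 : (!pvSkipKw.contains p && !PySem.Str.startswith p "(") = false := by
        rw [← Bool.not_or, h]; rfl
      rw [if_pos h, h2, ih]
    · have hf : (pvSkipKw.contains p || PySem.Str.startswith p "(") = false := by simpa using h
      have h2 : (!pvSkipKw.contains p && !PySem.Str.startswith p "(") = true := by
        rw [← Bool.not_or, hf]; rfl
      rw [if_neg h, h2]
      rfl

-- ---- the strip/startswith preamble of A equals B's first-token test ----

theorem pv_split_strip_str (line : String) :
    PySem.Str.split₀ (PySem.Str.strip line) = PySem.Str.split₀ line := by
  have hinj : Function.Injective (List.map String.toList) :=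
    List.map_injective_iff.mpr (fun a b h => String.toList_inj.mp h)
  apply hinj
  rw [PySem.Str.split₀_map_toList, PySem.Str.split₀_map_toList,
    PySem.Str.toList_strip, pv_split₀_strip]

theorem pv_cond_eq (line : String) :
    ((PySem.Str.startswith (PySem.Str.strip line) "Value" = true ∧
       3 ≤ (PySem.Str.split₀ line).length) ↔
     (3 ≤ (PySem.Str.split₀ line).length ∧
       PySem.Str.startswith ((PySem.Str.split₀ line).headD "") "Value" = true)) := by
  have hV : ∀ c ∈ "Value".toList, pvP c = true := by
    have h : "Value".toList = ['V','a','l','u','e'] := rfl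
    rw [h]; intro c hc
    fin_cases hc <;> rfl
  have hne : "Value".toList ≠ [] := by
    intro h
    have h2 := congrArg List.length h
    simp at h2
  have h1 : PySem.Str.startswith (PySem.Str.strip line) "Value" =
      PySem.Chars.startswith (PySem.Chars.strip line.toList) "Value".toList := by
    rw [PySem.Str.startswith_eq, PySem.Str.toList_strip]
  rw [h1, pv_startswith_strip line.toList hne hV]
  have h2 : PySem.Chars.split₀ line.toList = List.map String.toList (PySem.Str.split₀ line) :=
    (PySem.Str.split₀_map_toList line).symm
  rw [h2]
  cases hp : PySem.Str.split₀ line with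
  | nil => simp
  | cons p ps =>
    simp only [List.map_cons, List.headD_cons]
    rw [← PySem.Str.startswith_eq]
    exact and_comm

-- ---- A's per-line step in terms of pvEntry ----

theorem pv_astep_eq (line : String) (acc : List String × List String) :
    (let sline := PySem.Str.strip line
     if PySem.Str.startswith sline "Value" = true then
       let parts := PySem.Str.split₀ sline
       if 3 ≤ parts.length then
         let is_filldown : Bool := parts.contains "Filldown"
         pvAScan (PySem.List.enumerate (PySem.List.slice parts (some 1)) 1) is_filldown acc.1 acc.2
       else acc
     else acc) =
    (acc.1 ++ pvSelF (pvEntry line), acc.2 ++ pvSelR (pvEntry line)) := by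
  simp only [pv_split_strip_str]
  unfold pvEntry
  by_cases hc : 3 ≤ (PySem.Str.split₀ line).length ∧
      PySem.Str.startswith ((PySem.Str.split₀ line).headD "") "Value" = true
  · have hsw : PySem.Str.startswith (PySem.Str.strip line) "Value" = true :=
      ((pv_cond_eq line).mpr hc).1
    rw [if_pos hsw, if_pos hc.1, if_pos hc,
      PySem.List.slice_from _ (by norm_num : (0:Int) ≤ 1), pv_scan_eq_find]
    simp only [Int.toNat_one]
    cases hf : ((PySem.Str.split₀ line).drop 1).find?
        (fun p => !pvSkipKw.contains p && !PySem.Str.startswith p "(") with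
    | none => simp [pvSelF, pvSelR]
    | some n =>
      cases hfd : (PySem.Str.split₀ line).contains "Filldown" <;>
        simp [pvSelF, pvSelR]
  · rw [if_neg hc]
    by_cases hsw : PySem.Str.startswith (PySem.Str.strip line) "Value" = true
    · have hlen : ¬ 3 ≤ (PySem.Str.split₀ line).length :=
        fun h => hc ((pv_cond_eq line).mp ⟨hsw, h⟩)
      rw [if_pos hsw, if_neg hlen]
      simp [pvSelF, pvSelR]
    · rw [if_neg hsw]
      simp [pvSelF, pvSelR]

-- ---- B's recursion in terms of pvEntry ----

theorem pv_bstep_eq (lines : List String) :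
    pvGo lines = (lines.flatMap (fun line => pvSelF (pvEntry line)),
                  lines.flatMap (fun line => pvSelR (pvEntry line))) := by
  induction lines with
  | nil => rfl
  | cons line rest ih =>
    show (let fr := pvGo rest
          let parts := PySem.Str.split₀ line
          if 3 ≤ parts.length ∧ PySem.Str.startswith (parts.headD "") "Value" = true then
            match pvDropSkip (PySem.List.slice parts (some 1)) with
            | [] => fr
            | name :: _ =>
              if parts.contains "Filldown" then (name :: fr.1, fr.2) else (fr.1, name :: fr.2)
          else fr) = _
    rw [ih]
    simp only [List.flatMap_cons]
    unfold pvEntry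
    by_cases hc : 3 ≤ (PySem.Str.split₀ line).length ∧
        PySem.Str.startswith ((PySem.Str.split₀ line).headD "") "Value" = true
    · rw [if_pos hc, if_pos hc,
        PySem.List.slice_from _ (by norm_num : (0:Int) ≤ 1), pv_dropskip_eq_find]
      simp only [Int.toNat_one]
      have hh := pv_head_dropWhile_eq_find? ((PySem.Str.split₀ line).drop 1)
      cases hd : ((PySem.Str.split₀ line).drop 1).dropWhile
          (fun p => pvSkipKw.contains p || PySem.Str.startswith p "(") with
      | nil =>
        rw [hd] at hh
        have hn : ((PySem.Str.split₀ line).drop 1).find?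
            (fun p => !pvSkipKw.contains p && !PySem.Str.startswith p "(") = none := by
          rw [← hh]; rfl
        rw [hn]
        simp [pvSelF, pvSelR]
      | cons name tl =>
        rw [hd] at hh
        rw [← hh]
        cases hfd : (PySem.Str.split₀ line).contains "Filldown" <;>
          simp [pvSelF, pvSelR]
    · rw [if_neg hc, if_neg hc]
      simp [pvSelF, pvSelR]

-- ---- assembling A's fold ----

theorem pv_fold_A (lines : List String) : ∀ (fd reg : List String),
    lines.foldl
      (fun acc line =>
        let line := PySem.Str.strip line
        if PySem.Str.startswith line "Value" = true then
          let parts := PySem.Str.split₀ line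
          if 3 ≤ parts.length then
            let is_filldown : Bool := parts.contains "Filldown"
            pvAScan (PySem.List.enumerate (PySem.List.slice parts (some 1)) 1) is_filldown acc.1 acc.2
          else acc
        else acc) (fd, reg) =
      (fd ++ lines.flatMap (fun line => pvSelF (pvEntry line)),
       reg ++ lines.flatMap (fun line => pvSelR (pvEntry line))) := by
  induction lines with
  | nil => intro fd reg; simp
  | cons line rest ih =>
    intro fd reg
    rw [List.foldl_cons]
    have h := pv_astep_eq line (fd, reg)
    simp only at h
    rw [h, ih]
    simp

-- ===== VERDICT (by name: the statement is the Claim_ definition above) =====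
theorem parse_textfsm_filldown_values_spec : Claim_equal_parse_textfsm_filldown_values := by
  intro t _
  unfold Spec_parse_textfsm_filldown_values
  unfold parse_textfsm_filldown_values parse_textfsm_filldown_values_alt
  rw [pv_fold_A, pv_bstep_eq]
  simp
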